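-- pv_equiv track=rewrite | github.com/adonisbodea02/Fundamentals-of-Programming | Divide & Conquer.py | chipandconquer
-- ===== SOURCE A (Python) =====
-- def chipandconquer(List, i, f):
--
--     l = len(List)
--
--     s = 0
--
--     if i <= l:
--         s = f + List[i]
--
--     if i > l:
--         return 0
--
--     return s + chipandconquer(List, i + 2, s) - f
-- ===== SOURCE B (Python) =====
-- def chipandconquer(List, i, f):
--     l = len(List)
--     if i > l:
--         return 0
--     total = 0
--     for j in range(i, l, 2):
--         total += List[j]
--     return total
-- ===== Notes on version B (the rewrite author's own statement) =====
-- stated objective: simpler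
-- what changed: Replaces the recursion that threads an accumulator f (which provably cancels out of the result) with a single iterative range(i, len, 2) loop that just sums the strided elements.
import Mathlib
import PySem

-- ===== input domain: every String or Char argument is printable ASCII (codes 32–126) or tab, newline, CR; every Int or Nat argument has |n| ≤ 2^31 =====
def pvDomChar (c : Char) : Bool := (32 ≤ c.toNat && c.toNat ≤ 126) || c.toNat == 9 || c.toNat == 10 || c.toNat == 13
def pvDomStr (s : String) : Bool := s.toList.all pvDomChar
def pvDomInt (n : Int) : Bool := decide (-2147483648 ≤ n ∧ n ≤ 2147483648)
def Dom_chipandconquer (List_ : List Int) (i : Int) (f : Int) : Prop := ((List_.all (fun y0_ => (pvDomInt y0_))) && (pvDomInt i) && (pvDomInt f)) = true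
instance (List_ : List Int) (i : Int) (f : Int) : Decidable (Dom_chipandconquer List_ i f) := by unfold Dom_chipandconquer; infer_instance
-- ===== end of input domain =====

-- B replaces A's accumulator-threading recursion (the f argument provably cancels) by a
-- single iterative strided-range summation loop; objective: simpler.


-- ===== PORT A =====
-- literal port of A; List[i] is PySem.List.pyGet? totalized with .getD 0 (Pre_ excludes the
-- IndexError inputs)
def chipandconquer (List_ : List Int) (i : Int) (f : Int) : Int :=
  let l : Int := (List_.length : Int)
  let s : Int := if i ≤ l then f + (PySem.List.pyGet? List_ i).getD 0 else 0
  if h : i > l then 0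
  else s + chipandconquer List_ (i + 2) s - f
termination_by (2 + (List_.length : Int) - i).toNat
decreasing_by omega

-- ===== PORT B =====
def chipandconquer_alt (List_ : List Int) (i : Int) (f : Int) : Int :=
  let l : Int := (List_.length : Int)
  if i > l then 0
  else (PySem.List.pyRange i l 2).foldl
        (fun total j => total + (PySem.List.pyGet? List_ j).getD 0) 0

-- ===== PRECONDITION & SPEC =====
-- Pre_ excludes exactly the inputs where A raises IndexError: a stride index hits len(List)
-- (i ≤ len, len - i even) or runs below -len (i < -len).
def Pre_chipandconquer (List_ : List Int) (i : Int) (f : Int) : Prop :=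
  i > (List_.length : Int) ∨
    (-(List_.length : Int) ≤ i ∧ ((List_.length : Int) - i) % 2 = 1)
instance (List_ : List Int) (i : Int) (f : Int) : Decidable (Pre_chipandconquer List_ i f) := by
  unfold Pre_chipandconquer; infer_instance

def pvWitness_chipandconquer : List Int × Int × Int := ([1, 2, 3], 0, 0)


def Spec_chipandconquer (List_ : List Int) (i : Int) (f : Int) (out : Int) : Prop :=
  out = chipandconquer_alt List_ i f
instance (List_ : List Int) (i : Int) (f : Int) (out : Int) : Decidable (Spec_chipandconquer List_ i f out) := by
  unfold Spec_chipandconquer; infer_instance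

-- ===== CLAIM (what is proved, stated in full; the proofs are below) =====
def Claim_equal_chipandconquer : Prop := ∀ (List_ : List Int) (i : Int) (f : Int), Dom_chipandconquer List_ i f → Pre_chipandconquer List_ i f → Spec_chipandconquer List_ i f (chipandconquer List_ i f)

-- ===== LEMMAS AND PROOFS =====

-- strided sum of the selected elements: what B's loop computes (via foldl_add)
def pvStrideSum (List_ : List Int) (i : Int) : Int :=
  ((PySem.List.pyRange i (List_.length : Int) 2).map
    (fun j => (PySem.List.pyGet? List_ j).getD 0)).sum

theorem pyRange_two_nil (a b : Int) (h : b ≤ a) : PySem.List.pyRange a b 2 = [] := by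
  rw [PySem.List.pyRange_of_pos a b (by norm_num)]
  simp [if_neg (by omega : ¬ a < b)]

theorem pyRange_two_cons (a b : Int) (h : a < b) :
    PySem.List.pyRange a b 2 = a :: PySem.List.pyRange (a + 2) b 2 := by
  rw [PySem.List.pyRange_of_pos a b (by norm_num),
      PySem.List.pyRange_of_pos (a + 2) b (by norm_num)]
  have hn : (if a < b then ((b - a + 2 - 1) / 2).toNat else 0)
      = (if a + 2 < b then ((b - (a + 2) + 2 - 1) / 2).toNat else 0) + 1 := by
    split_ifs <;> omega
  rw [hn, List.range_succ_eq_map]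
  simp [List.map_map, Function.comp]
  intro k _
  ring

theorem chipandconquer_eq_strideSum (List_ : List Int) :
    ∀ (n : Nat) (i f : Int), (2 + (List_.length : Int) - i).toNat ≤ n →
      -(List_.length : Int) ≤ i → ((List_.length : Int) - i) % 2 = 1 →
      chipandconquer List_ i f = pvStrideSum List_ i := by
  intro n
  induction n with
  | zero =>
    intro i f hle hlo hpar
    have hi : (List_.length : Int) < i := by omega
    rw [chipandconquer]
    simp only [dif_pos (show i > (List_.length : Int) from hi)]
    unfold pvStrideSum
    rw [pyRange_two_nil _ _ (le_of_lt hi)]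
    simp
  | succ n ih =>
    intro i f hle hlo hpar
    by_cases hi : i > (List_.length : Int)
    · rw [chipandconquer]
      simp only [dif_pos hi]
      unfold pvStrideSum
      rw [pyRange_two_nil _ _ (le_of_lt hi)]
      simp
    · have hlt : i < (List_.length : Int) := by omega
      rw [chipandconquer]
      simp only [dif_neg hi, if_pos (by omega : i ≤ (List_.length : Int))]
      rw [ih (i + 2) (f + (PySem.List.pyGet? List_ i).getD 0) (by omega) (by omega) (by omega)]
      unfold pvStrideSum
      rw [pyRange_two_cons _ _ hlt]
      simp only [List.map_cons, List.sum_cons]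
      ring

theorem chipandconquer_alt_eq_strideSum (List_ : List Int) (i f : Int)
    (h : ¬ i > (List_.length : Int)) :
    chipandconquer_alt List_ i f = pvStrideSum List_ i := by
  unfold chipandconquer_alt pvStrideSum
  simp only [if_neg h]
  rw [PySem.List.foldl_add]
  ring

-- ===== VERDICT (by name: the statement is the Claim_ definition above) =====
theorem chipandconquer_spec : Claim_equal_chipandconquer := by
  intro List_ i f _ hpre
  unfold Spec_chipandconquer
  by_cases hi : i > (List_.length : Int)
  · rw [chipandconquer]
    unfold chipandconquer_alt
    simp only [dif_pos hi, if_pos hi]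
  · rcases hpre with hpre | ⟨hlo, hpar⟩
    · exact absurd hpre hi
    · rw [chipandconquer_eq_strideSum List_ (2 + (List_.length : Int) - i).toNat i f le_rfl hlo hpar,
          chipandconquer_alt_eq_strideSum List_ i f hi]
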